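-- pv_equiv track=rewrite | github.com/ml-tooling/lazycluster | lazycluster/_utils.py | get_remaining_ports
-- ===== SOURCE A (Python) =====
-- from typing import List, Union
--
-- def get_remaining_ports(ports: List[int], last_used_port: int) -> List[int]:
--     """Get a new list with the remaining ports after cutting out all ports until and incl. the last used port.
--
--     Args:
--         ports (List[int]): The port list to be updated.
--         last_used_port (int): The last port that was actually used. All ports up this one and including this one will
--                               be removed.
--     Returns:
--         List with remaining ports
--     """
--     skip = True
--     final_port_list = []
--     for port in ports:
--         if skip:
--             if port == last_used_port:
--                 skip = False
--             continue
--         final_port_list.append(port)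
--     return final_port_list
-- ===== SOURCE B (Python) =====
-- def get_remaining_ports(ports, last_used_port):
--     """Locate the first occurrence of last_used_port and return the slice after it; [] if absent."""
--     if last_used_port in ports:
--         idx = ports.index(last_used_port)
--         return ports[idx + 1:]
--     return []
-- ===== Notes on version B (the rewrite author's own statement) =====
-- stated objective: simpler
-- what changed: Replaces the skip-flag accumulator loop with a locate-then-slice decomposition: find the first occurrence via list.index and return the slice after it ([] if absent).
import Mathlib
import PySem

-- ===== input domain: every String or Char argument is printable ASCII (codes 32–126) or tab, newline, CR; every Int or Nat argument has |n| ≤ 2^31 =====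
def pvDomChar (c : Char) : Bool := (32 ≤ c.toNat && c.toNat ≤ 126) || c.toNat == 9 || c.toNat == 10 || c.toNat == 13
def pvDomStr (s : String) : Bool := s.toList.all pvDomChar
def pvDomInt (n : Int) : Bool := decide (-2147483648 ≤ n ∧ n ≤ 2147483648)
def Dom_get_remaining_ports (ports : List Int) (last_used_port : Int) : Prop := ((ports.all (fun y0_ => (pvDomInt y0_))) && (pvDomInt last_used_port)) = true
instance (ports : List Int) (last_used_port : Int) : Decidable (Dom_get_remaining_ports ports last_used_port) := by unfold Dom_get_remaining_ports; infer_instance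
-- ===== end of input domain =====

-- B replaces A's skip-flag accumulator loop with a locate-then-slice decomposition (objective: simpler); same return value everywhere, A is total.


-- ===== PORT A =====
def goA : List Int → Int → Bool → List Int → List Int
  | [], _, _, acc => acc
  | port :: rest, last, skip, acc =>
    if skip then
      goA rest last (if port == last then false else true) acc
    else
      goA rest last skip (acc ++ [port])

def get_remaining_ports (ports : List Int) (last_used_port : Int) : List Int :=
  goA ports last_used_port true []

-- ===== PORT B =====
def get_remaining_ports_alt (ports : List Int) (last_used_port : Int) : List Int :=
  if last_used_port ∈ ports then
    match PySem.List.index? ports last_used_port with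
    | some idx => PySem.List.slice ports (some ((idx : Int) + 1)) none
    | none => []
  else []

-- ===== PRECONDITION & SPEC =====
def Spec_get_remaining_ports (ports : List Int) (last_used_port : Int) (out : List Int) : Prop := out = get_remaining_ports_alt ports last_used_port
instance (ports : List Int) (last_used_port : Int) (out : List Int) : Decidable (Spec_get_remaining_ports ports last_used_port out) := by unfold Spec_get_remaining_ports; infer_instance

-- ===== CLAIM (what is proved, stated in full; the proofs are below) =====
def Claim_equal_get_remaining_ports : Prop := ∀ (ports : List Int) (last_used_port : Int), Dom_get_remaining_ports ports last_used_port → Spec_get_remaining_ports ports last_used_port (get_remaining_ports ports last_used_port)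

-- ===== LEMMAS AND PROOFS =====

-- ===== VERDICT (by name: the statement is the Claim_ definition above) =====
theorem goA_false (rest : List Int) (last : Int) (acc : List Int) :
    goA rest last false acc = acc ++ rest := by
  induction rest generalizing acc with
  | nil => simp [goA]
  | cons p t ih => simp [goA, ih]

theorem goA_true_eq_alt (ports : List Int) (last : Int) :
    goA ports last true [] = get_remaining_ports_alt ports last := by
  induction ports with
  | nil => simp [goA, get_remaining_ports_alt]
  | cons p t ih =>
    by_cases hp : p = last
    · subst hp
      have hidx : PySem.List.index? (p :: t) p = some 0 := PySem.List.index?_cons_self _ _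
      simp only [goA, beq_self_eq_true, if_true, goA_false, List.nil_append,
        get_remaining_ports_alt, List.mem_cons, true_or, if_true, hidx]
      rw [show ((0 : Nat) : Int) + 1 = ((1 : Nat) : Int) by norm_num,
        PySem.List.slice_from_natCast]
      simp
    · have hne : (p == last) = false := by simp [hp]
      rw [show goA (p :: t) last true [] = goA t last true [] by simp [goA, hne]]
      rw [ih]
      unfold get_remaining_ports_alt
      rw [PySem.List.index?_cons_of_ne (x := p) (v := last) (xs := t) hp]
      by_cases hm : last ∈ t
      · obtain ⟨k, hk⟩ : ∃ k, PySem.List.index? t last = some k := by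
          have h := (PySem.List.index?_isSome_iff (xs := t) (v := last)).mpr hm
          exact Option.isSome_iff_exists.mp h
        simp only [hm, if_true, List.mem_cons, or_true, hk, Option.map_some]
        rw [show ((k : Int) + 1) = (((k + 1 : Nat) : Int)) by push_cast; ring,
          PySem.List.slice_from_natCast,
          show (((k + 1 : Nat) : Int)) + 1 = (((k + 2 : Nat) : Int)) by push_cast; ring,
          PySem.List.slice_from_natCast]
        simp [List.drop_succ_cons]
      · simp [hm, Ne.symm hp]

theorem get_remaining_ports_spec : Claim_equal_get_remaining_ports := by
  intro ports last _
  unfold Spec_get_remaining_ports get_remaining_ports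
  exact goA_true_eq_alt ports last
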